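-- pv_equiv track=rewrite | github.com/teleprint-me/mini | mini/cli/processor.py | generate_next_token_supervision
-- ===== SOURCE A (Python) =====
-- def pad_sequence(
--     tokens: list[int], pad_token: int, max_seq_len: int, offset: int
-- ) -> list[int]:
--     """Pads a sequence to max_seq_len with a given pad_token."""
--     assert max_seq_len > 0, "max_seq_len must be greater than 0"
--     assert max_seq_len >= offset, "max_seq_len must be greater than or equal to offset"
--     return tokens + [pad_token] * (max_seq_len - offset)
--
-- def generate_next_token_supervision(tokens, pad_token=0, max_seq_len=128):
--     """
--     Generates training pairs where the target is the full sequence.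
--
--     Args:
--         tokens (list[int]): Full tokenized sequence.
--         pad_token (int): Placeholder token for masked values.
--         max_seq_len (int): Maximum sequence length.
--
--     Returns:
--         list[dict]: List of {"input": ..., "target": ...} dictionaries.
--     """
--     sequences = []
--     length = len(tokens)
--
--     for i in range(1, length):
--         input_seq = pad_sequence(tokens[:i], pad_token, max_seq_len, i)
--         target_seq = pad_sequence(tokens[: i + 1], pad_token, max_seq_len, i + 1)
--         assert len(input_seq) == len(target_seq), "Sequences must be the same shape"
--         sequences.append({"input": input_seq, "target": target_seq})
--
--     return sequences
-- ===== SOURCE B (Python) =====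
-- def generate_next_token_supervision(tokens, pad_token=0, max_seq_len=128):
--     """Same pairs as A, built by writing one token per step into a single padded buffer."""
--     if len(tokens) < 2:
--         return []
--     cur = [pad_token] * max_seq_len
--     cur[0] = tokens[0]
--     pairs = []
--     for i in range(1, len(tokens)):
--         nxt = cur.copy()
--         nxt[i] = tokens[i]
--         pairs.append({"input": cur, "target": nxt})
--         cur = nxt
--     return pairs
-- ===== Notes on version B (the rewrite author's own statement) =====
-- stated objective: alternative
-- what changed: A re-slices the token list and re-pads two fresh prefixes via pad_sequence on every iteration; B never slices: it allocates one padded buffer up front and per step copies it and overwrites a single position with the next token, emitting the (current, next) buffer pair.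
import Mathlib
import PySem

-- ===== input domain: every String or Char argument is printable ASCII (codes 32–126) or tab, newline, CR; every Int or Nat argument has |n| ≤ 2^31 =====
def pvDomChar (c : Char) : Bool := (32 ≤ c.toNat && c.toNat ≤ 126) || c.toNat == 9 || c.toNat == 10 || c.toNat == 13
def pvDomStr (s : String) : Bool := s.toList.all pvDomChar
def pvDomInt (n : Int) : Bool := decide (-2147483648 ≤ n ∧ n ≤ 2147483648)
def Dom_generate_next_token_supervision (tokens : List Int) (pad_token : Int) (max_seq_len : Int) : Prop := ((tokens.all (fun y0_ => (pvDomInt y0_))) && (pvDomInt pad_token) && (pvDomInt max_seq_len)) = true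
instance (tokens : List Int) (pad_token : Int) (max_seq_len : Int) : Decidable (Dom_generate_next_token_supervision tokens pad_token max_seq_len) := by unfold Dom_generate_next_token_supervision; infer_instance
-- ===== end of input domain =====

-- B replaces A's per-iteration slicing and re-padding with a single padded buffer that is
-- copied and written at one position per step (alternative decomposition, same cost).

-- ===== PORT A =====
-- pad_sequence: 'tokens + [pad_token] * (max_seq_len - offset)'; the two asserts raise
-- exactly where Pre_ below is false, so on Pre_ the repeat count is nonnegative and .toNat is exact.
def pad_sequence (tokens : List Int) (pad_token : Int) (max_seq_len : Int) (offset : Int) : List Int :=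
  tokens ++ List.replicate (max_seq_len - offset).toNat pad_token

def generate_next_token_supervision (tokens : List Int) (pad_token : Int) (max_seq_len : Int) : List (List (String × List Int)) :=
  (PySem.List.pyRange 1 (tokens.length : Int) 1).foldl
    (fun sequences i =>
      let input_seq := pad_sequence (PySem.List.slice tokens none (some i)) pad_token max_seq_len i
      let target_seq := pad_sequence (PySem.List.slice tokens none (some (i + 1))) pad_token max_seq_len (i + 1)
      sequences ++ [[("input", input_seq), ("target", target_seq)]]) []

-- ===== PORT B =====
-- the for-loop of Source B: at step i, nxt = cur with position i overwritten by the next token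
-- (the loop reads tokens[i], so the recursion consumes the remaining tokens directly);
-- inside Pre_ the written index is always in range, matching Python's cur[i] = tokens[i].
def pvB_loop (cur : List Int) (i : Nat) (rest : List Int) : List (List (String × List Int)) :=
  match rest with
  | [] => []
  | t :: rest' =>
    let nxt := cur.set i t
    [("input", cur), ("target", nxt)] :: pvB_loop nxt (i + 1) rest'

def generate_next_token_supervision_alt (tokens : List Int) (pad_token : Int) (max_seq_len : Int) : List (List (String × List Int)) :=
  match tokens with
  | t0 :: t1 :: rest =>
    let cur := (List.replicate max_seq_len.toNat pad_token).set 0 t0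
    pvB_loop cur 1 (t1 :: rest)
  | _ => []

-- ===== PRECONDITION & SPEC =====
-- Pre_ excludes exactly the inputs where A's asserts raise AssertionError
-- (length ≥ 2 with max_seq_len ≤ 0 or max_seq_len < length); B raises IndexError there.
def Pre_generate_next_token_supervision (tokens : List Int) (pad_token : Int) (max_seq_len : Int) : Prop :=
  tokens.length < 2 ∨ (0 < max_seq_len ∧ (tokens.length : Int) ≤ max_seq_len)
instance (tokens : List Int) (pad_token : Int) (max_seq_len : Int) : Decidable (Pre_generate_next_token_supervision tokens pad_token max_seq_len) := by unfold Pre_generate_next_token_supervision; infer_instance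
def pvWitness_generate_next_token_supervision : List Int × Int × Int := ([1, 2, 3], 0, 5)

def Spec_generate_next_token_supervision (tokens : List Int) (pad_token : Int) (max_seq_len : Int) (out : List (List (String × List Int))) : Prop := out = generate_next_token_supervision_alt tokens pad_token max_seq_len
instance (tokens : List Int) (pad_token : Int) (max_seq_len : Int) (out : List (List (String × List Int))) : Decidable (Spec_generate_next_token_supervision tokens pad_token max_seq_len out) := by unfold Spec_generate_next_token_supervision; infer_instance

-- ===== CLAIM (what is proved, stated in full; the proofs are below) =====
def Claim_equal_generate_next_token_supervision : Prop := ∀ (tokens : List Int) (pad_token : Int) (max_seq_len : Int), Dom_generate_next_token_supervision tokens pad_token max_seq_len → Pre_generate_next_token_supervision tokens pad_token max_seq_len → Spec_generate_next_token_supervision tokens pad_token max_seq_len (generate_next_token_supervision tokens pad_token max_seq_len)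

-- ===== LEMMAS AND PROOFS =====

-- the padded prefix of length M holding the first k tokens
def pvPref (tokens : List Int) (pad : Int) (M : Int) (k : Nat) : List Int :=
  tokens.take k ++ List.replicate (M.toNat - k) pad

lemma pvPref_set (tokens : List Int) (pad : Int) (M : Int) (k : Nat)
    (hk : k < tokens.length) (hm : tokens.length ≤ M.toNat) :
    (pvPref tokens pad M k).set k (tokens[k]) = pvPref tokens pad M (k + 1) := by
  unfold pvPref
  have hlen : (tokens.take k).length = k := List.length_take_of_le (le_of_lt hk)
  have hrep : M.toNat - k = (M.toNat - (k + 1)) + 1 := by omega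
  have htake : tokens.take (k + 1) = tokens.take k ++ [tokens[k]] := by
    rw [List.take_succ, List.getElem?_eq_getElem hk]; rfl
  rw [List.set_append_right _ _ (by omega), hlen, Nat.sub_self, hrep,
      List.replicate_succ, List.set_cons_zero, htake, List.append_assoc]
  rfl

-- the loop of B, started at the k-th padded prefix, produces exactly A's rows for i = k, …, n-1
lemma pvB_loop_eq (tokens : List Int) (pad : Int) (M : Int) (hm : tokens.length ≤ M.toNat) :
    ∀ (rest : List Int) (k : Nat), rest = tokens.drop k →
    pvB_loop (pvPref tokens pad M k) k rest
      = (PySem.List.pyRange (k : Int) (tokens.length : Int) 1).map (fun i =>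
          [("input", pad_sequence (PySem.List.slice tokens none (some i)) pad M i),
           ("target", pad_sequence (PySem.List.slice tokens none (some (i + 1))) pad M (i + 1))]) := by
  intro rest
  induction rest with
  | nil =>
    intro k hk
    have hlen : tokens.length ≤ k := by
      have := congrArg List.length hk
      simp [List.length_drop] at this
      omega
    rw [PySem.List.pyRange_one_eq_nil (by exact_mod_cast hlen)]
    rfl
  | cons t rest' ih =>
    intro k hk
    have hklt : k < tokens.length := by
      by_contra h
      rw [List.drop_eq_nil_of_le (by omega)] at hk
      simp at hk
    have hdrop : tokens.drop k = tokens[k] :: tokens.drop (k + 1) :=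
      List.drop_eq_getElem_cons hklt
    rw [hdrop] at hk
    have ht : t = tokens[k] := (List.cons.injEq _ _ _ _ ▸ hk).1
    have hrest : rest' = tokens.drop (k + 1) := (List.cons.injEq _ _ _ _ ▸ hk).2
    have hstep := ih (k + 1) hrest
    push_cast at hstep
    rw [PySem.List.pyRange_one_cons (by exact_mod_cast hklt), List.map_cons]
    simp only [pvB_loop]
    rw [ht, pvPref_set tokens pad M k hklt hm, hstep]
    congr 1
    unfold pad_sequence pvPref
    rw [show ((k : Int) + 1) = (((k + 1 : Nat) : Int)) from by push_cast; ring,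
        PySem.List.slice_to_natCast, PySem.List.slice_to_natCast]
    have e3 : (M - (k : Int)).toNat = M.toNat - k := by omega
    have e4 : (M - ((k + 1 : Nat) : Int)).toNat = M.toNat - (k + 1) := by omega
    rw [e3, e4]

lemma ports_agree (tokens : List Int) (pad_token : Int) (max_seq_len : Int)
    (hpre : Pre_generate_next_token_supervision tokens pad_token max_seq_len) :
    generate_next_token_supervision tokens pad_token max_seq_len
      = generate_next_token_supervision_alt tokens pad_token max_seq_len := by
  unfold generate_next_token_supervision generate_next_token_supervision_alt
  rw [PySem.List.foldl_append_singleton_eq_map, List.nil_append]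
  match tokens, hpre with
  | [], _ =>
    rw [PySem.List.pyRange_one_eq_nil (by simp)]
    rfl
  | [t0], _ =>
    rw [PySem.List.pyRange_one_eq_nil (by simp)]
    rfl
  | t0 :: t1 :: rest, hpre =>
    rcases hpre with h | ⟨hpos, hle⟩
    · simp at h
    · have hm : (t0 :: t1 :: rest).length ≤ max_seq_len.toNat := by
        simp only [List.length_cons] at hle ⊢; omega
      have hcur : (List.replicate max_seq_len.toNat pad_token).set 0 t0
          = pvPref (t0 :: t1 :: rest) pad_token max_seq_len 1 := by
        unfold pvPref
        have h1 : max_seq_len.toNat = (max_seq_len.toNat - 1) + 1 := by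
          simp only [List.length_cons] at hm; omega
        rw [h1, List.replicate_succ, List.set_cons_zero]
        simp
      show _ = pvB_loop ((List.replicate max_seq_len.toNat pad_token).set 0 t0) 1 (t1 :: rest)
      rw [hcur,
        pvB_loop_eq (t0 :: t1 :: rest) pad_token max_seq_len hm (t1 :: rest) 1 (by simp)]
      norm_num

-- ===== VERDICT (by name: the statement is the Claim_ definition above) =====
theorem generate_next_token_supervision_spec : Claim_equal_generate_next_token_supervision := by
  intro tokens pad_token max_seq_len _ hpre
  unfold Spec_generate_next_token_supervision
  exact ports_agree tokens pad_token max_seq_len hpre
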